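-- pv_equiv track=rewrite | github.com/gautam132002/invoice-pdf-data-extraction | qnot.py | remove_footer
-- ===== SOURCE A (Python) =====
-- def remove_footer(lst):
--     l = []
--
--     try:
--         for i in lst:
--
--             if i.startswith("order comments"):
--                 ind = lst.index(i)
--                 l = lst[:ind]
--                 break
--
--             else:
--                 l = lst
--     except:
--         l = lst
--     return l
-- ===== SOURCE B (Python) =====
-- from itertools import takewhile
--
--
-- def remove_footer(lst):
--     # Keep the longest prefix of lines that are not "order comments" lines.
--     return list(takewhile(lambda s: not s.startswith("order comments"), lst))
-- ===== Notes on version B (the rewrite author's own statement) =====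
-- stated objective: simpler
-- what changed: Replaces the scan-then-lst.index-then-slice loop (with its mutable accumulator and try/except) by a single itertools.takewhile prefix, which is correct because the element found is the first match so index+slice is exactly the longest non-matching prefix.
import Mathlib
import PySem

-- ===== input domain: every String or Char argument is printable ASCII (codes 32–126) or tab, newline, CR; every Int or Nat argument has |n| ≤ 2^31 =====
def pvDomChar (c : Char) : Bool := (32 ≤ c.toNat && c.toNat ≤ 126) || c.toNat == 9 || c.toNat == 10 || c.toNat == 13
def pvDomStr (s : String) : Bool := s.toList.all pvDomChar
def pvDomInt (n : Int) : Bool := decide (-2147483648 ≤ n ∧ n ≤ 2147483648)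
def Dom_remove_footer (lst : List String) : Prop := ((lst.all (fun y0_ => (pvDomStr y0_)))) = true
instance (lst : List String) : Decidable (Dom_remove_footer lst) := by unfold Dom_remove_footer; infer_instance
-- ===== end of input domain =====

-- ===== PORT A =====
-- B replaces the index+slice loop of A by a single takeWhile prefix; return-value equivalence only.
-- literal transliteration of A: for i in lst: if i.startswith(...): ind = lst.index(i); l = lst[:ind]; break; else: l = lst
def removeFooterGo (lst : List String) (rest : List String) (l : List String) : List String :=
  match rest with
  | [] => l
  | i :: rs =>
    if PySem.Str.startswith i "order comments" then
      match PySem.List.index? lst i with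
      | some ind => PySem.List.slice lst none (some (ind : Int))   -- l = lst[:ind]; break
      | none => lst                                                -- ValueError -> bare except: l = lst
    else
      removeFooterGo lst rs lst                                    -- else: l = lst

def remove_footer (lst : List String) : List String :=
  removeFooterGo lst lst []

-- ===== PORT B =====
def remove_footer_alt (lst : List String) : List String :=
  lst.takeWhile (fun s => !(PySem.Str.startswith s "order comments"))

-- ===== PRECONDITION & SPEC =====
def Spec_remove_footer (lst : List String) (out : List String) : Prop := out = remove_footer_alt lst
instance (lst : List String) (out : List String) : Decidable (Spec_remove_footer lst out) := by unfold Spec_remove_footer; infer_instance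

-- ===== CLAIM (what is proved, stated in full; the proofs are below) =====
def Claim_equal_remove_footer : Prop := ∀ (lst : List String), Dom_remove_footer lst → Spec_remove_footer lst (remove_footer lst)

-- ===== LEMMAS AND PROOFS =====

theorem takeWhile_append_of_ne {p : String → Bool} {pre rs : List String} {i : String}
    (hpre : ∀ x ∈ pre, p x = true) (hi : p i = false) :
    (pre ++ i :: rs).takeWhile p = pre := by
  induction pre with
  | nil => simp [hi]
  | cons a t ih =>
    have ha : p a = true := hpre a (by simp)
    simp only [List.cons_append, List.takeWhile_cons, ha, if_true]
    rw [ih (fun x hx => hpre x (by simp [hx]))]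

theorem removeFooterGo_eq :
    ∀ (rest pre l : List String),
      (∀ x ∈ pre, (PySem.Str.startswith x "order comments") = false) →
      (rest = [] → l = (pre ++ rest).takeWhile
          (fun s => !(PySem.Str.startswith s "order comments"))) →
      removeFooterGo (pre ++ rest) rest l
        = (pre ++ rest).takeWhile (fun s => !(PySem.Str.startswith s "order comments")) := by
  intro rest
  induction rest with
  | nil =>
    intro pre l hpre hl
    rw [removeFooterGo]
    exact hl rfl
  | cons i rs ih =>
    intro pre l hpre _
    rw [removeFooterGo]
    by_cases hi : PySem.Str.startswith i "order comments" = true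
    · -- match found: index? returns the first occurrence, which is pre.length
      have hnot : i ∉ pre := fun hm => by
        rw [hpre i hm] at hi; exact absurd hi (by decide)
      have hidx : PySem.List.index? (pre ++ i :: rs) i = some pre.length := by
        rw [PySem.List.index?_eq_some_iff]
        exact ⟨pre, rs, rfl, rfl, hnot⟩
      have htw : (pre ++ i :: rs).takeWhile
          (fun s => !(PySem.Str.startswith s "order comments")) = pre :=
        takeWhile_append_of_ne
          (fun x hx => by
            show (!(PySem.Str.startswith x "order comments")) = true
            rw [hpre x hx]; rfl)
          (by show (!(PySem.Str.startswith i "order comments")) = false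
              rw [hi]; rfl)
      rw [if_pos hi, hidx]
      show PySem.List.slice (pre ++ i :: rs) none (some (pre.length : Int))
          = List.takeWhile (fun s => !(PySem.Str.startswith s "order comments")) (pre ++ i :: rs)
      rw [PySem.List.slice_to_natCast, htw, List.take_left]
    · -- no match: recurse with l = lst
      have hi' : PySem.Str.startswith i "order comments" = false :=
        Bool.not_eq_true _ ▸ (Bool.of_not_eq_true hi)
      have hpre' : ∀ x ∈ pre ++ [i], (PySem.Str.startswith x "order comments") = false := by
        intro x hx
        rcases List.mem_append.mp hx with h | h
        · exact hpre x h
        · rw [List.mem_singleton] at h; rw [h]; exact hi'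
      have hrec := ih (pre ++ [i]) ((pre ++ [i]) ++ rs) hpre' (by
        intro hrs
        subst hrs
        refine (List.takeWhile_eq_self_iff.mpr ?_).symm
        intro x hx
        show (!(PySem.Str.startswith x "order comments")) = true
        rw [hpre' x (by simpa using hx)]; rfl)
      rw [if_neg hi]
      simpa only [List.append_assoc, List.singleton_append] using hrec

-- ===== VERDICT (by name: the statement is the Claim_ definition above) =====
theorem remove_footer_spec : Claim_equal_remove_footer := by
  intro lst _
  show remove_footer lst = remove_footer_alt lst
  exact removeFooterGo_eq lst [] []
    (fun x hx => absurd hx (List.not_mem_nil))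
    (fun h => by subst h; rfl)
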